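-- pv_equiv track=rewrite | github.com/holiday01/hcc-annotation-benchmark | scripts/17_run_scType_on_benchmark.py | sctype_to_broad7
-- ===== SOURCE A (Python) =====
-- def sctype_to_broad6(label: str) -> str:
--     if label == "Unknown":
--         return "Unknown"
--     lo = label.lower()
--     if any(k in lo for k in ["t cells", "t cell", "nkt", "natural killer", "γδ", "nk"]):
--         return "T/NK"
--     if any(k in lo for k in ["b cells", "b cell", "plasma"]):
--         return "B"
--     if any(
--         k in lo
--         for k in [
--             "monocyte",
--             "macrophage",
--             "kupffer",
--             "dendritic",
--             "neutrophil",
--             "eosinophil",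
--             "basophil",
--             "mast",
--             "granulocyte",
--             "myeloid",
--         ]
--     ):
--         return "Myeloid"
--     if "endothelial" in lo:
--         return "Endothelial"
--     if any(k in lo for k in ["hepatic stellate", "mesenchymal stem"]):
--         return "Fibroblast"
--     if any(
--         k in lo
--         for k in [
--             "hepatocyte",
--             "hepatoblast",
--             "cholangiocyte",
--             "liver progenitor",
--             "cancer stem",
--             "cancer cells",
--         ]
--     ):
--         return "Hepatocyte"
--     return "Unknown"
--
-- def sctype_to_broad7(label: str) -> str:
--     broad6 = sctype_to_broad6(label)
--     if broad6 == "T/NK":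
--         return "T cell"
--     if broad6 == "B":
--         return "B cell"
--     if broad6 == "Myeloid":
--         return "TAM"
--     if broad6 == "Endothelial":
--         return "TEC"
--     if broad6 == "Fibroblast":
--         return "CAF"
--     lo = label.lower()
--     if any(k in lo for k in ["hepatoblast", "cholangiocyte", "liver progenitor"]):
--         return "HPC-like"
--     if broad6 == "Hepatocyte":
--         return "Malignant cell"
--     return "Unknown"
-- ===== SOURCE B (Python) =====
-- # Flat priority table: every keyword mapped to (priority, broad7 result).
-- KW = [
--     ("t cells", 0, "T cell"), ("t cell", 0, "T cell"), ("nkt", 0, "T cell"),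
--     ("natural killer", 0, "T cell"), ("\u03b3\u03b4", 0, "T cell"), ("nk", 0, "T cell"),
--     ("b cells", 1, "B cell"), ("b cell", 1, "B cell"), ("plasma", 1, "B cell"),
--     ("monocyte", 2, "TAM"), ("macrophage", 2, "TAM"), ("kupffer", 2, "TAM"),
--     ("dendritic", 2, "TAM"), ("neutrophil", 2, "TAM"), ("eosinophil", 2, "TAM"),
--     ("basophil", 2, "TAM"), ("mast", 2, "TAM"), ("granulocyte", 2, "TAM"),
--     ("myeloid", 2, "TAM"),
--     ("endothelial", 3, "TEC"),
--     ("hepatic stellate", 4, "CAF"), ("mesenchymal stem", 4, "CAF"),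
--     ("hepatoblast", 5, "HPC-like"), ("cholangiocyte", 5, "HPC-like"),
--     ("liver progenitor", 5, "HPC-like"),
--     ("hepatocyte", 6, "Malignant cell"), ("cancer stem", 6, "Malignant cell"),
--     ("cancer cells", 6, "Malignant cell"),
-- ]
--
-- def sctype_to_broad7(label: str) -> str:
--     if label == "Unknown":
--         return "Unknown"
--     lo = label.lower()
--     hits = [(p, r) for k, p, r in KW if k in lo]
--     if not hits:
--         return "Unknown"
--     best = hits[0]
--     for h in hits[1:]:
--         if h[0] < best[0]:
--             best = h
--     return best[1]
-- ===== Notes on version B (the rewrite author's own statement) =====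
-- stated objective: alternative
-- what changed: Replaced A's two-stage first-match cascade (label -> broad6 -> broad7) by a flat keyword->(priority,result) table: B scans all 24 keywords, collects every matching (priority,result) pair and returns the result of minimum priority (Unknown if none).
import Mathlib
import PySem

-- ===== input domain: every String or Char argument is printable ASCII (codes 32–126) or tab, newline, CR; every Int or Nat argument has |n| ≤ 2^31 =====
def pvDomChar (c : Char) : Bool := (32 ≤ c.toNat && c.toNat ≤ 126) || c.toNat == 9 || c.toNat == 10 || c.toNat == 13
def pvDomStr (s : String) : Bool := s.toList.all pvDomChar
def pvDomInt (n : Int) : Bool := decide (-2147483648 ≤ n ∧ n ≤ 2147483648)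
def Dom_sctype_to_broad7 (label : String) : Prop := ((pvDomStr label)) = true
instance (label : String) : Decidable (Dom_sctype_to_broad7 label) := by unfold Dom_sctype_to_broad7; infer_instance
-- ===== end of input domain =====

-- B replaces A's two-stage first-match cascade by a flat keyword->(priority,result) table:
-- collect every matching pair, return the result of minimum priority; same values, no speed claim.

-- ===== PORT A =====
def sctype_to_broad6 (label : String) : String :=
  if label == "Unknown" then "Unknown"
  else
    let lo := PySem.Str.lower label
    if (["t cells", "t cell", "nkt", "natural killer", "γδ", "nk"].any
        (fun k => PySem.Str.isIn k lo)) then "T/NK"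
    else if (["b cells", "b cell", "plasma"].any (fun k => PySem.Str.isIn k lo)) then "B"
    else if (["monocyte", "macrophage", "kupffer", "dendritic", "neutrophil",
              "eosinophil", "basophil", "mast", "granulocyte", "myeloid"].any
        (fun k => PySem.Str.isIn k lo)) then "Myeloid"
    else if PySem.Str.isIn "endothelial" lo then "Endothelial"
    else if (["hepatic stellate", "mesenchymal stem"].any (fun k => PySem.Str.isIn k lo)) then "Fibroblast"
    else if (["hepatocyte", "hepatoblast", "cholangiocyte", "liver progenitor",
              "cancer stem", "cancer cells"].any (fun k => PySem.Str.isIn k lo)) then "Hepatocyte"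
    else "Unknown"

def sctype_to_broad7 (label : String) : String :=
  let broad6 := sctype_to_broad6 label
  if broad6 == "T/NK" then "T cell"
  else if broad6 == "B" then "B cell"
  else if broad6 == "Myeloid" then "TAM"
  else if broad6 == "Endothelial" then "TEC"
  else if broad6 == "Fibroblast" then "CAF"
  else
    let lo := PySem.Str.lower label
    if (["hepatoblast", "cholangiocyte", "liver progenitor"].any (fun k => PySem.Str.isIn k lo)) then "HPC-like"
    else if broad6 == "Hepatocyte" then "Malignant cell"
    else "Unknown"

-- ===== PORT B =====
def kwTable : List (String × Nat × String) :=
  [ ("t cells", 0, "T cell"), ("t cell", 0, "T cell"), ("nkt", 0, "T cell"),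
    ("natural killer", 0, "T cell"), ("γδ", 0, "T cell"), ("nk", 0, "T cell"),
    ("b cells", 1, "B cell"), ("b cell", 1, "B cell"), ("plasma", 1, "B cell"),
    ("monocyte", 2, "TAM"), ("macrophage", 2, "TAM"), ("kupffer", 2, "TAM"),
    ("dendritic", 2, "TAM"), ("neutrophil", 2, "TAM"), ("eosinophil", 2, "TAM"),
    ("basophil", 2, "TAM"), ("mast", 2, "TAM"), ("granulocyte", 2, "TAM"),
    ("myeloid", 2, "TAM"),
    ("endothelial", 3, "TEC"),
    ("hepatic stellate", 4, "CAF"), ("mesenchymal stem", 4, "CAF"),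
    ("hepatoblast", 5, "HPC-like"), ("cholangiocyte", 5, "HPC-like"),
    ("liver progenitor", 5, "HPC-like"),
    ("hepatocyte", 6, "Malignant cell"), ("cancer stem", 6, "Malignant cell"),
    ("cancer cells", 6, "Malignant cell") ]

-- the 'for h in hits[1:]' loop of Source B
def pickMin (h : Nat × String) (t : List (Nat × String)) : Nat × String :=
  t.foldl (fun best x => if x.1 < best.1 then x else best) h

def sctype_to_broad7_alt (label : String) : String :=
  if label == "Unknown" then "Unknown"
  else
    let lo := PySem.Str.lower label
    match (kwTable.filter (fun e => PySem.Str.isIn e.1 lo)).map (fun e => e.2) with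
    | [] => "Unknown"
    | h :: t => (pickMin h t).2

-- ===== PRECONDITION & SPEC =====
def Spec_sctype_to_broad7 (label : String) (out : String) : Prop := out = sctype_to_broad7_alt label
instance (label : String) (out : String) : Decidable (Spec_sctype_to_broad7 label out) := by unfold Spec_sctype_to_broad7; infer_instance

-- ===== CLAIM (what is proved, stated in full; the proofs are below) =====
def Claim_equal_sctype_to_broad7 : Prop := ∀ (label : String), Dom_sctype_to_broad7 label → Spec_sctype_to_broad7 label (sctype_to_broad7 label)

-- ===== LEMMAS AND PROOFS =====

-- running B's hits list (empty → "Unknown", else minimum-priority result)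
def runB (hits : List (Nat × String)) : String :=
  match hits with
  | [] => "Unknown"
  | h :: t => (pickMin h t).2

-- if nothing beats the accumulator, the fold keeps it
theorem pickMin_const (v : Nat × String) (t : List (Nat × String))
    (h : ∀ x ∈ t, v.1 ≤ x.1) : pickMin v t = v := by
  induction t with
  | nil => rfl
  | cons x xs ih =>
      have hx : ¬ x.1 < v.1 := not_lt.mpr (h x (List.mem_cons_self))
      simp only [pickMin, List.foldl_cons, if_neg hx]
      exact ih (fun y hy => h y (List.mem_cons_of_mem _ hy))

theorem min_head (v : Nat × String) (l rest : List (Nat × String))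
    (hl : ∀ x ∈ l, x = v) (hr : ∀ x ∈ rest, v.1 ≤ x.1) :
    pickMin v (l ++ rest) = v := by
  induction l with
  | nil => simpa using pickMin_const v rest hr
  | cons x xs ih =>
      have hx : x = v := hl x (List.mem_cons_self)
      subst hx
      simp only [List.cons_append, pickMin, List.foldl_cons, lt_self_iff_false, if_false]
      exact ih (fun y hy => hl y (List.mem_cons_of_mem _ hy))

-- peel one keyword group off the front of the hits list
theorem peel (kws : List String) (q : String → Bool) (i : Nat) (r : String)
    (rest : List (Nat × String)) (hr : ∀ x ∈ rest, i ≤ x.1) :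
    runB (((kws.filter q).map (fun _ => (i, r))) ++ rest)
      = if kws.any q then r else runB rest := by
  cases h : kws.filter q with
  | nil =>
      have : kws.any q = false := by
        by_contra hny
        obtain ⟨x, hx, hqx⟩ := List.any_eq_true.mp (Bool.of_not_eq_false hny)
        have : x ∈ kws.filter q := List.mem_filter.mpr ⟨hx, hqx⟩
        simp [h] at this
      simp [this]
  | cons k ks =>
      have hany : kws.any q = true := by
        have hk : k ∈ kws.filter q := by simp [h]
        exact List.any_eq_true.mpr ⟨k, (List.mem_filter.mp hk).1, (List.mem_filter.mp hk).2⟩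
      have : runB (((k :: ks).map (fun _ => (i, r))) ++ rest) = r := by
        simp only [List.map_cons, List.cons_append, runB]
        have hm := min_head (i, r) (ks.map (fun _ => (i, r))) rest
          (by intro x hx; obtain ⟨a, _, hax⟩ := List.mem_map.mp hx; exact hax.symm) hr
        rw [hm]
      rw [this, hany]; rfl

-- A's single 6-keyword hepatocyte test is the disjunction of B's group-5 and group-6 tests.
theorem hep_split (lo : String) :
    (["hepatocyte", "hepatoblast", "cholangiocyte", "liver progenitor",
      "cancer stem", "cancer cells"].any (fun k => PySem.Str.isIn k lo))
    = ((["hepatoblast", "cholangiocyte", "liver progenitor"].any (fun k => PySem.Str.isIn k lo))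
       || (["hepatocyte", "cancer stem", "cancer cells"].any (fun k => PySem.Str.isIn k lo))) := by
  simp only [List.any_cons, List.any_nil, Bool.or_false]
  cases PySem.Str.isIn "hepatocyte" lo <;>
    cases PySem.Str.isIn "hepatoblast" lo <;>
      cases PySem.Str.isIn "cholangiocyte" lo <;>
        cases PySem.Str.isIn "liver progenitor" lo <;>
          cases PySem.Str.isIn "cancer stem" lo <;>
            cases PySem.Str.isIn "cancer cells" lo <;> rfl

-- group keyword lists
def g0 : List String := ["t cells", "t cell", "nkt", "natural killer", "γδ", "nk"]
def g1 : List String := ["b cells", "b cell", "plasma"]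
def g2 : List String := ["monocyte", "macrophage", "kupffer", "dendritic", "neutrophil",
  "eosinophil", "basophil", "mast", "granulocyte", "myeloid"]
def g3 : List String := ["endothelial"]
def g4 : List String := ["hepatic stellate", "mesenchymal stem"]
def g5 : List String := ["hepatoblast", "cholangiocyte", "liver progenitor"]
def g6 : List String := ["hepatocyte", "cancer stem", "cancer cells"]

-- pull one element out of a filtered-then-mapped list
theorem fmap_filter_cons {α β : Type} (f : α → β) (q : α → Bool) (a : α) (l : List α) :
    ((List.filter q (a :: l)).map f) = (if q a then [f a] else []) ++ (l.filter q).map f := by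
  by_cases h : q a <;> simp [h]

-- B's hit list decomposes into the seven keyword-group blocks
theorem hits_decomp (q : String → Bool) :
    (kwTable.filter (fun e => q e.1)).map (fun e => e.2)
      = ((g0.filter q).map (fun _ => ((0 : Nat), "T cell")))
        ++ ((g1.filter q).map (fun _ => ((1 : Nat), "B cell")))
        ++ ((g2.filter q).map (fun _ => ((2 : Nat), "TAM")))
        ++ ((g3.filter q).map (fun _ => ((3 : Nat), "TEC")))
        ++ ((g4.filter q).map (fun _ => ((4 : Nat), "CAF")))
        ++ ((g5.filter q).map (fun _ => ((5 : Nat), "HPC-like")))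
        ++ ((g6.filter q).map (fun _ => ((6 : Nat), "Malignant cell"))) := by
  simp only [kwTable, g0, g1, g2, g3, g4, g5, g6, fmap_filter_cons,
    List.filter_nil, List.map_nil, List.append_nil, List.append_assoc]

-- membership in a constant-mapped filtered block has that block's priority
theorem mem_block {x : Nat × String} {kws : List String} {q : String → Bool} {i : Nat} {r : String}
    (hx : x ∈ (kws.filter q).map (fun _ => (i, r))) : x.1 = i := by
  obtain ⟨k, _, hk⟩ := List.mem_map.mp hx
  rw [← hk]

-- B reduces to the seven-way priority cascade
theorem alt_cascade (q : String → Bool) :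
    runB ((kwTable.filter (fun e => q e.1)).map (fun e => e.2))
      = if g0.any q then "T cell"
        else if g1.any q then "B cell"
        else if g2.any q then "TAM"
        else if g3.any q then "TEC"
        else if g4.any q then "CAF"
        else if g5.any q then "HPC-like"
        else if g6.any q then "Malignant cell"
        else "Unknown" := by
  rw [hits_decomp]
  rw [List.append_assoc, List.append_assoc, List.append_assoc, List.append_assoc,
      List.append_assoc]
  rw [peel g0 q 0 "T cell" _ (by
    intro x hx
    exact Nat.zero_le _)]
  rw [peel g1 q 1 "B cell" _ (by
    intro x hx
    rcases List.mem_append.mp hx with h | h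
    · rw [mem_block h]; omega
    rcases List.mem_append.mp h with h | h
    · rw [mem_block h]; omega
    rcases List.mem_append.mp h with h | h
    · rw [mem_block h]; omega
    rcases List.mem_append.mp h with h | h
    · rw [mem_block h]; omega
    · rw [mem_block h]; omega)]
  rw [peel g2 q 2 "TAM" _ (by
    intro x hx
    rcases List.mem_append.mp hx with h | h
    · rw [mem_block h]; omega
    rcases List.mem_append.mp h with h | h
    · rw [mem_block h]; omega
    rcases List.mem_append.mp h with h | h
    · rw [mem_block h]; omega
    · rw [mem_block h]; omega)]
  rw [peel g3 q 3 "TEC" _ (by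
    intro x hx
    rcases List.mem_append.mp hx with h | h
    · rw [mem_block h]; omega
    rcases List.mem_append.mp h with h | h
    · rw [mem_block h]; omega
    · rw [mem_block h]; omega)]
  rw [peel g4 q 4 "CAF" _ (by
    intro x hx
    rcases List.mem_append.mp hx with h | h
    · rw [mem_block h]; omega
    · rw [mem_block h]; omega)]
  rw [peel g5 q 5 "HPC-like" _ (by
    intro x hx
    rw [mem_block hx]; omega)]
  have h6 := peel g6 q 6 "Malignant cell" [] (by intro x hx; simp at hx)
  simp only [List.append_nil] at h6
  rw [h6]
  rfl

-- ===== VERDICT (by name: the statement is the Claim_ definition above) =====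
theorem sctype_to_broad7_spec : Claim_equal_sctype_to_broad7 := by
  intro label _
  show sctype_to_broad7 label = sctype_to_broad7_alt label
  unfold sctype_to_broad7 sctype_to_broad6 sctype_to_broad7_alt
  cases h0 : label == "Unknown"
  case true =>
    have hl : label = "Unknown" := by simpa using h0
    subst hl; decide
  case false =>
  simp only [Bool.false_eq_true, if_false]
  rw [hep_split]
  have hB := alt_cascade (fun k => PySem.Str.isIn k (PySem.Str.lower label))
  simp only [runB] at hB
  rw [hB]
  simp only [g0, g1, g2, g3, g4, g5, g6, List.any_cons, List.any_nil, Bool.or_false]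
  cases h1 : (PySem.Str.isIn "t cells" (PySem.Str.lower label) || (PySem.Str.isIn "t cell" (PySem.Str.lower label) || (PySem.Str.isIn "nkt" (PySem.Str.lower label) || (PySem.Str.isIn "natural killer" (PySem.Str.lower label) || (PySem.Str.isIn "γδ" (PySem.Str.lower label) || PySem.Str.isIn "nk" (PySem.Str.lower label)))))) <;>
  cases h2 : (PySem.Str.isIn "b cells" (PySem.Str.lower label) || (PySem.Str.isIn "b cell" (PySem.Str.lower label) || PySem.Str.isIn "plasma" (PySem.Str.lower label))) <;>
  cases h3 : (PySem.Str.isIn "monocyte" (PySem.Str.lower label) || (PySem.Str.isIn "macrophage" (PySem.Str.lower label) || (PySem.Str.isIn "kupffer" (PySem.Str.lower label) || (PySem.Str.isIn "dendritic" (PySem.Str.lower label) || (PySem.Str.isIn "neutrophil" (PySem.Str.lower label) || (PySem.Str.isIn "eosinophil" (PySem.Str.lower label) || (PySem.Str.isIn "basophil" (PySem.Str.lower label) || (PySem.Str.isIn "mast" (PySem.Str.lower label) || (PySem.Str.isIn "granulocyte" (PySem.Str.lower label) || PySem.Str.isIn "myeloid" (PySem.Str.lower label)))))))))) <;>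
  cases h4 : PySem.Str.isIn "endothelial" (PySem.Str.lower label) <;>
  cases h5 : (PySem.Str.isIn "hepatic stellate" (PySem.Str.lower label) || PySem.Str.isIn "mesenchymal stem" (PySem.Str.lower label)) <;>
  cases h6 : (PySem.Str.isIn "hepatoblast" (PySem.Str.lower label) || (PySem.Str.isIn "cholangiocyte" (PySem.Str.lower label) || PySem.Str.isIn "liver progenitor" (PySem.Str.lower label))) <;>
  cases h7 : (PySem.Str.isIn "hepatocyte" (PySem.Str.lower label) || (PySem.Str.isIn "cancer stem" (PySem.Str.lower label) || PySem.Str.isIn "cancer cells" (PySem.Str.lower label))) <;>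
    rfl
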